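-- pv_equiv track=rewrite | github.com/odoo/odoo | openerp/tools/inflect.py | make_pl_si_lists
-- ===== SOURCE A (Python) =====
-- def enclose(s):
--     return "(?:%s)" % s
--
-- def joinstem(cutpoint=0, words=''):
--     '''
--     join stem of each word in words into a string for regex
--     each word is truncated at cutpoint
--     cutpoint is usually negative indicating the number of letters to remove
--     from the end of each word
--
--     e.g.
--     joinstem(-2, ["ephemeris", "iris", ".*itis"]) returns
--     (?:ephemer|ir|.*it)
--
--     '''
--     return enclose('|'.join(w[:cutpoint] for w in words))
--
-- def bysize(words):
--     '''
--     take a list of words and return a dict of sets sorted by word length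
--     e.g.
--     ret[3]=set(['ant', 'cat', 'dog', 'pig'])
--     ret[4]=set(['frog', 'goat'])
--     ret[5]=set(['horse'])
--     ret[8]=set(['elephant'])
--     '''
--     ret = {}
--     for w in words:
--         if len(w) not in ret:
--             ret[len(w)] = set()
--         ret[len(w)].add(w)
--     return ret
--
-- def make_pl_si_lists(lst, plending, siendingsize, dojoinstem=True):
--     '''
--     given a list of singular words: lst
--     an ending to append to make the plural: plending
--     the number of characters to remove from the singular before appending plending: siendingsize
--     a flag whether to create a joinstem: dojoinstem
--
--     return:
--     a list of pluralised words: si_list (called si because this is what you need to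
--                                          look for to make the singular)
--     the pluralised words as a dict of sets sorted by word length: si_bysize
--     the singular words as a dict of sets sorted by word length: pl_bysize
--     if dojoinstem is True: a regular expression that matches any of the stems: stem
--     '''
--     if siendingsize is not None:
--         siendingsize = -siendingsize
--     si_list = [w[:siendingsize] + plending for w in lst]
--     pl_bysize = bysize(lst)
--     si_bysize = bysize(si_list)
--     if dojoinstem:
--         stem = joinstem(siendingsize, lst)
--         return si_list, si_bysize, pl_bysize, stem
--     else:
--         return si_list, si_bysize, pl_bysize
-- ===== SOURCE B (Python) =====
-- def _buckets(words):
--     # bucket words by length: ordered distinct lengths first, then one filter scan per length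
--     return {n: {w for w in words if len(w) == n}
--             for n in dict.fromkeys(len(w) for w in words)}
--
-- def make_pl_si_lists(lst, plending, siendingsize, dojoinstem=True):
--     cut = None if siendingsize is None else -siendingsize
--     stems = [w[:cut] for w in lst]
--     si_list = [s + plending for s in stems]
--     si_bysize = _buckets(si_list)
--     pl_bysize = _buckets(lst)
--     if dojoinstem:
--         return si_list, si_bysize, pl_bysize, "(?:%s)" % "|".join(stems)
--     return si_list, si_bysize, pl_bysize
-- ===== Notes on version B (the rewrite author's own statement) =====
-- stated objective: alternative
-- what changed: bysize's single-pass dict-of-sets bucketing is replaced by a two-phase comprehension (ordered distinct lengths via dict.fromkeys, then one filter scan per length), and the stems are computed once and shared between si_list and the joined regex instead of being sliced twice. Pre_ excludes dojoinstem=False, where the Python returns a 3-tuple instead of the declared 4-component type.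
import Mathlib
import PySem

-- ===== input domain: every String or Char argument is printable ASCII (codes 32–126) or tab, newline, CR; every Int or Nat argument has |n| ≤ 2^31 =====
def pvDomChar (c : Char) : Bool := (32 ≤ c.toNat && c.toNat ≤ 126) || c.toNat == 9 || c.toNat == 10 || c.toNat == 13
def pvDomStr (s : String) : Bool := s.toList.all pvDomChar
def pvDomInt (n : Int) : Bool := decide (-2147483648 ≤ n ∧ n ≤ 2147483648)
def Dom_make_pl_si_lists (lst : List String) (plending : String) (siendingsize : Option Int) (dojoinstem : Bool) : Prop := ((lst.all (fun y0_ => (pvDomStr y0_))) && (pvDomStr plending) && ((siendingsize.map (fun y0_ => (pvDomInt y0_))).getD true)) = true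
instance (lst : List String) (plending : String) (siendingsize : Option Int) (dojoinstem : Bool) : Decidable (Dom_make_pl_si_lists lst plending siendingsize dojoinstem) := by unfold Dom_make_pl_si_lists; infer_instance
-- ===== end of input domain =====

-- ===== PORT A =====
-- B restructures bysize (distinct lengths + per-length filter, vs single-pass dict-of-sets) and computes stems once; alternative decomposition, not faster.
def pvLenKey (w : String) : Int := (PySem.Str.len w : Int)

-- enclose(s) = "(?:%s)" % s
def pvEnclose (s : List Char) : List Char := "(?:".toList ++ s ++ ")".toList

-- joinstem(cutpoint, words) = enclose('|'.join(w[:cutpoint] for w in words))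
def pvJoinstem (cutpoint : Option Int) (words : List String) : List Char :=
  pvEnclose (PySem.Chars.join "|".toList (words.map (fun w => PySem.List.slice w.toList none cutpoint)))

-- one iteration of bysize's loop: if len(w) not in ret: ret[len(w)] = set(); ret[len(w)].add(w)
def pvBysizeStep (d : PySem.Dict Int (List String)) (w : String) : PySem.Dict Int (List String) :=
  let n := pvLenKey w
  let d1 := if d.contains n then d else d.insert n PySem.Set.empty
  d1.modify n [] (fun s => PySem.Set.add s w)

def pvBysize (words : List String) : PySem.Dict Int (List String) :=
  words.foldl pvBysizeStep PySem.Dict.empty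

def make_pl_si_lists (lst : List String) (plending : String) (siendingsize : Option Int) (dojoinstem : Bool) : List String × (List (Int × List String)) × (List (Int × List String)) × Option String :=
  let siendingsize := siendingsize.map (fun n => -n)
  let si_list := lst.map (fun w => String.ofList (PySem.List.slice w.toList none siendingsize ++ plending.toList))
  let pl_bysize := pvBysize lst
  let si_bysize := pvBysize si_list
  if dojoinstem then
    (si_list, si_bysize.items, pl_bysize.items, some (String.ofList (pvJoinstem siendingsize lst)))
  else
    (si_list, si_bysize.items, pl_bysize.items, none)

-- ===== PORT B =====
-- _buckets(words): {n: {w for w in words if len(w) == n} for n in dict.fromkeys(len(w) for w in words)}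
def pvBuckets (words : List String) : List (Int × List String) :=
  (PySem.List.dedup (words.map pvLenKey)).map
    (fun n => (n, PySem.Set.ofList (words.filter (fun w => pvLenKey w == n))))

def make_pl_si_lists_alt (lst : List String) (plending : String) (siendingsize : Option Int) (dojoinstem : Bool) : List String × (List (Int × List String)) × (List (Int × List String)) × Option String :=
  let cut : Option Int := match siendingsize with | none => none | some n => some (-n)
  let stems := lst.map (fun w => PySem.List.slice w.toList none cut)
  let si_list := stems.map (fun s => String.ofList (s ++ plending.toList))
  let si_bysize := pvBuckets si_list
  let pl_bysize := pvBuckets lst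
  if dojoinstem then
    (si_list, si_bysize, pl_bysize, some (String.ofList ("(?:".toList ++ PySem.Chars.join "|".toList stems ++ ")".toList)))
  else
    (si_list, si_bysize, pl_bysize, none)

-- ===== PRECONDITION & SPEC =====
-- Pre_ excludes dojoinstem = false, on which the Python returns a 3-tuple, not a value of the
-- declared 4-component return type (the Optional stem component is absent, not None).
def Pre_make_pl_si_lists (lst : List String) (plending : String) (siendingsize : Option Int) (dojoinstem : Bool) : Prop := dojoinstem = true
instance (lst : List String) (plending : String) (siendingsize : Option Int) (dojoinstem : Bool) : Decidable (Pre_make_pl_si_lists lst plending siendingsize dojoinstem) := by unfold Pre_make_pl_si_lists; infer_instance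
def pvWitness_make_pl_si_lists : List String × String × Option Int × Bool := (["cat", "dog", "horse"], "s", some 0, true)

def Spec_make_pl_si_lists (lst : List String) (plending : String) (siendingsize : Option Int) (dojoinstem : Bool) (out : List String × (List (Int × List String)) × (List (Int × List String)) × Option String) : Prop := out = make_pl_si_lists_alt lst plending siendingsize dojoinstem
instance (lst : List String) (plending : String) (siendingsize : Option Int) (dojoinstem : Bool) (out : List String × (List (Int × List String)) × (List (Int × List String)) × Option String) : Decidable (Spec_make_pl_si_lists lst plending siendingsize dojoinstem out) := by unfold Spec_make_pl_si_lists; infer_instance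

-- ===== CLAIM (what is proved, stated in full; the proofs are below) =====
def Claim_equal_make_pl_si_lists : Prop := ∀ (lst : List String) (plending : String) (siendingsize : Option Int) (dojoinstem : Bool), Dom_make_pl_si_lists lst plending siendingsize dojoinstem → Pre_make_pl_si_lists lst plending siendingsize dojoinstem → Spec_make_pl_si_lists lst plending siendingsize dojoinstem (make_pl_si_lists lst plending siendingsize dojoinstem)


-- ===== LEMMAS AND PROOFS =====
theorem pvBysizeStep_keys (d : PySem.Dict Int (List String)) (w : String) :
    (pvBysizeStep d w).keys = PySem.Set.add d.keys (pvLenKey w) := by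
  unfold pvBysizeStep
  rw [PySem.Dict.keys_modify]
  by_cases h : d.contains (pvLenKey w) = true
  · have hm : pvLenKey w ∈ d.keys := (PySem.Dict.contains_iff_mem_keys d _).mp h
    rw [if_pos h, PySem.Dict.keys_insert_of_contains _ _ h]
    simp [PySem.Set.add, PySem.Set.contains, hm]
  · have h' : d.contains (pvLenKey w) = false := by simpa using h
    have hm : pvLenKey w ∉ d.keys := fun hc => h ((PySem.Dict.contains_iff_mem_keys d _).mpr hc)
    rw [if_neg h,
      PySem.Dict.keys_insert_of_contains _ _ (PySem.Dict.contains_insert_self _ _ _),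
      PySem.Dict.keys_insert_of_not_contains _ _ h']
    simp [PySem.Set.add, PySem.Set.contains, hm]

theorem pvBysizeStep_getD (d : PySem.Dict Int (List String)) (w : String) (n : Int) :
    (pvBysizeStep d w).getD n [] =
      if pvLenKey w = n then PySem.Set.add (d.getD n []) w else d.getD n [] := by
  unfold pvBysizeStep
  have hd1 : ∀ m : Int,
      (if d.contains (pvLenKey w) = true then d else d.insert (pvLenKey w) PySem.Set.empty).getD m []
        = d.getD m [] := by
    intro m
    split
    · rfl
    · rename_i h
      have h' : d.contains (pvLenKey w) = false := by simpa using h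
      rw [PySem.Dict.getD_insert]
      split
      · rename_i hm
        subst hm
        rw [PySem.Dict.getD_of_not_contains d _ h']
        rfl
      · rfl
  rw [PySem.Dict.getD_modify, hd1, hd1]
  by_cases hn : pvLenKey w = n
  · simp [hn]
  · rw [if_neg hn, if_neg (fun h => hn h.symm)]

theorem pvBysize_keys_aux (ws : List String) (d : PySem.Dict Int (List String)) :
    (ws.foldl pvBysizeStep d).keys = PySem.Set.update d.keys (ws.map pvLenKey) := by
  induction ws generalizing d with
  | nil => rfl
  | cons w ws ih =>
      simp only [List.foldl_cons, List.map_cons, PySem.Set.update]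
      rw [ih, pvBysizeStep_keys]
      rfl

theorem pvBysize_getD_aux (ws : List String) (d : PySem.Dict Int (List String)) (n : Int) :
    (ws.foldl pvBysizeStep d).getD n [] =
      PySem.Set.update (d.getD n []) (ws.filter (fun w => pvLenKey w == n)) := by
  induction ws generalizing d with
  | nil => rfl
  | cons w ws ih =>
      simp only [List.foldl_cons, List.filter_cons]
      rw [ih, pvBysizeStep_getD]
      by_cases hn : pvLenKey w = n
      · simp [hn, PySem.Set.update]
      · have hb : (pvLenKey w == n) = false := by simpa using hn
        simp [hn, hb]

theorem pvBysize_items (ws : List String) : (pvBysize ws).items = pvBuckets ws := by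
  have hkeys : (pvBysize ws).keys = PySem.List.dedup (ws.map pvLenKey) := by
    rw [pvBysize, pvBysize_keys_aux, PySem.List.dedup_eq_ofList, PySem.Set.ofList_eq_foldl]
    rfl
  have hnd : (pvBysize ws).keys.Nodup := by
    rw [hkeys, PySem.List.dedup_eq_ofList]
    exact PySem.Set.nodup_ofList _
  rw [PySem.Dict.items_eq_map_keys _ hnd [], hkeys, pvBuckets]
  refine List.map_congr_left (fun n hn => ?_)
  rw [pvBysize, pvBysize_getD_aux, PySem.Set.ofList_eq_foldl]
  rfl

-- ===== VERDICT (by name: the statement is the Claim_ definition above) =====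
theorem make_pl_si_lists_spec : Claim_equal_make_pl_si_lists := by
  intro lst plending siendingsize dojoinstem h hpre
  clear h hpre
  unfold Spec_make_pl_si_lists make_pl_si_lists make_pl_si_lists_alt
  cases siendingsize <;>
    simp only [Option.map, pvBysize_items, pvJoinstem, pvEnclose, List.map_map] <;>
    cases dojoinstem <;> rfl
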